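-- pv_equiv track=rewrite | github.com/woowacourse-study/2022-lv3-algorithm-study | 3주차/13702/13702_python_이프.py | search
-- ===== SOURCE A (Python) =====
-- def search(cups, target):
--     start = 1
--     end = max(cups)
--
--     result = 0
--     while (start <= end):
--         mid = (start + end) // 2
--
--         count = sum([cup // mid for cup in cups])
--         if (count >= target):
--             result = mid
--             start = mid + 1
--         else:
--             end = mid -1
--
--     return result
-- ===== SOURCE B (Python) =====
-- def search(cups, target):
--     freq = {}
--     for cup in cups:
--         freq[cup] = freq.get(cup, 0) + 1
--     items = list(freq.items())
--
--     def enough(m):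
--         total = 0
--         for v, c in items:
--             total += (v // m) * c
--         return total >= target
--
--     def go(lo, hi, best):
--         if lo > hi:
--             return best
--         mid = (lo + hi) // 2
--         if enough(mid):
--             return go(mid + 1, hi, mid)
--         return go(lo, mid - 1, best)
--
--     return go(1, max(cups), 0)
-- ===== Notes on version B (the rewrite author's own statement) =====
-- stated objective: alternative
-- what changed: B first builds a frequency dictionary of cup sizes once and evaluates each candidate size over the distinct values weighted by their counts ((v//m)*c), and replaces A's mutating while-loop by a recursive binary search threading the best size as an accumulator.
-- outside the precondition, e.g. on search([], 3): A raises ValueError, B raises ValueError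
import Mathlib
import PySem

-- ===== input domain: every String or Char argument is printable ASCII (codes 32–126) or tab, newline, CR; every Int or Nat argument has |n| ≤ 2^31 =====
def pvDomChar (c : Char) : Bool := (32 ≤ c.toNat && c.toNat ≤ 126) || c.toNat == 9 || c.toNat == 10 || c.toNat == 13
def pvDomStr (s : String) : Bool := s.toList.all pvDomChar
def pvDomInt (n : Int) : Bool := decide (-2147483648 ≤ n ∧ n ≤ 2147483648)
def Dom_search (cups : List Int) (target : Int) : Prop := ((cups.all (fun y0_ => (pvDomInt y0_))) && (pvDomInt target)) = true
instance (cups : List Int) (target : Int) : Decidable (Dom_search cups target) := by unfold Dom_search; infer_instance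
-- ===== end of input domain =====

-- B replaces A's while-loop binary search over the raw list by a recursive binary search over a
-- frequency dictionary built once (count = sum of (v // m) * multiplicity); neither mutates its arguments.

-- ===== PORT A =====
-- A's while loop, state (start, end, result)
def searchLoop (cups : List Int) (target start e result : Int) : Int :=
  if h : start ≤ e then
    let mid := PySem.Int.floordiv (start + e) 2
    let count := (cups.map (fun cup => PySem.Int.floordiv cup mid)).sum
    if count ≥ target then
      searchLoop cups target (mid + 1) e mid
    else
      searchLoop cups target start (mid - 1) result
  else result
termination_by (e - start + 1).toNat
decreasing_by
  · have := PySem.Int.floordiv_two_mid_bounds h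
    omega
  · have := PySem.Int.floordiv_two_mid_bounds h
    omega

def search (cups : List Int) (target : Int) : Int :=
  searchLoop cups target 1 ((PySem.List.max? cups id).getD 0) 0

-- ===== PORT B =====
-- B: 'freq = {}; for cup in cups: freq[cup] = freq.get(cup, 0) + 1; items = list(freq.items())'
def bFreq (cups : List Int) : PySem.Dict Int Int :=
  cups.foldl (fun d cup => d.insert cup (d.getD cup 0 + 1)) PySem.Dict.empty

-- B's enough(m): 'total = 0; for v, c in items: total += (v // m) * c; return total >= target'
def bTotal (items : List (Int × Int)) (m : Int) : Int :=
  items.foldl (fun total vc => total + PySem.Int.floordiv vc.1 m * vc.2) 0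

def bEnough (items : List (Int × Int)) (target m : Int) : Bool :=
  bTotal items m ≥ target

-- B's go(lo, hi, best)
def bGo (items : List (Int × Int)) (target lo hi best : Int) : Int :=
  if h : lo > hi then best
  else
    let mid := PySem.Int.floordiv (lo + hi) 2
    if bEnough items target mid then
      bGo items target (mid + 1) hi mid
    else
      bGo items target lo (mid - 1) best
termination_by (hi - lo + 1).toNat
decreasing_by
  · have := PySem.Int.floordiv_two_mid_bounds (by omega : lo ≤ hi)
    omega
  · have := PySem.Int.floordiv_two_mid_bounds (by omega : lo ≤ hi)
    omega

def search_alt (cups : List Int) (target : Int) : Int :=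
  bGo (bFreq cups).items target 1 ((PySem.List.max? cups id).getD 0) 0

-- ===== PRECONDITION & SPEC =====
-- Pre_ excludes the empty list, on which A's max(cups) raises ValueError (B raises there too).
def Pre_search (cups : List Int) (target : Int) : Prop := cups ≠ []
instance (cups : List Int) (target : Int) : Decidable (Pre_search cups target) := by unfold Pre_search; infer_instance
def pvWitness_search : List Int × Int := ([7, 8, 10], 4)

def Spec_search (cups : List Int) (target : Int) (out : Int) : Prop := out = search_alt cups target
instance (cups : List Int) (target : Int) (out : Int) : Decidable (Spec_search cups target out) := by unfold Spec_search; infer_instance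

-- ===== CLAIM (what is proved, stated in full; the proofs are below) =====
def Claim_equal_search : Prop := ∀ (cups : List Int) (target : Int), Dom_search cups target → Pre_search cups target → Spec_search cups target (search cups target)

-- ===== LEMMAS AND PROOFS =====

-- summing g over a nodup key list containing x picks out g x once
theorem sum_map_ite_key (g : Int → Int) :
    ∀ (ks : List Int), ks.Nodup → ∀ x ∈ ks,
      (ks.map (fun k => if k = x then g k else 0)).sum = g x := by
  intro ks
  induction ks with
  | nil => intro _ x hx; cases hx
  | cons k ks ih =>
    intro hnd x hx
    rcases List.nodup_cons.mp hnd with ⟨hk, hnd'⟩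
    rcases List.mem_cons.mp hx with rfl | hx
    · have hz : (ks.map (fun k' => if k' = x then g k' else 0)).sum = 0 := by
        rw [List.sum_eq_zero]
        intro y hy
        rcases List.mem_map.mp hy with ⟨k', hk', rfl⟩
        have : k' ≠ x := by rintro rfl; exact hk hk'
        simp [this]
      simp [hz]
    · have hne : k ≠ x := by rintro rfl; exact hk hx
      simp [hne, ih hnd' x hx]

-- grouped weighted sum over distinct keys equals the plain sum over the list
theorem sum_count_mul (g : Int → Int) :
    ∀ (xs ks : List Int), ks.Nodup → (∀ x ∈ xs, x ∈ ks) →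
      (ks.map (fun k => g k * ((xs.count k : Nat) : Int))).sum = (xs.map g).sum := by
  intro xs
  induction xs with
  | nil => intro ks _ _; simp
  | cons x xs ih =>
    intro ks hnd hsub
    have hx : x ∈ ks := hsub x (List.mem_cons_self)
    have hsub' : ∀ y ∈ xs, y ∈ ks := fun y hy => hsub y (List.mem_cons_of_mem _ hy)
    have hsplit : ∀ k : Int,
        g k * (((x :: xs).count k : Nat) : Int)
          = g k * ((xs.count k : Nat) : Int) + (if k = x then g k else 0) := by
      intro k
      rw [List.count_cons]
      by_cases hkx : k = x
      · push_cast
        simp [hkx]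
        ring
      · simp [Ne.symm hkx, hkx]
    calc (ks.map (fun k => g k * (((x :: xs).count k : Nat) : Int))).sum
        = (ks.map (fun k => g k * ((xs.count k : Nat) : Int) + (if k = x then g k else 0))).sum := by
          congr 1; exact List.map_congr_left (fun k _ => hsplit k)
      _ = (ks.map (fun k => g k * ((xs.count k : Nat) : Int))).sum
            + (ks.map (fun k => if k = x then g k else 0)).sum := by
          rw [List.sum_map_add]
      _ = (xs.map g).sum + g x := by
          rw [ih ks hnd hsub', sum_map_ite_key g ks hnd x hx]
      _ = ((x :: xs).map g).sum := by simp [add_comm]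

-- B's weighted total over the frequency dict's items equals A's per-cup sum
theorem bTotal_eq (cups : List Int) (m : Int) :
    bTotal (bFreq cups).items m = (cups.map (fun cup => PySem.Int.floordiv cup m)).sum := by
  have hfreq : bFreq cups = PySem.Dict.counter cups :=
    PySem.Dict.foldl_insert_getD_add_one_eq_counter cups
  rw [bTotal, hfreq,
    PySem.List.foldl_add (PySem.Dict.counter cups).items (fun vc => PySem.Int.floordiv vc.1 m * vc.2) 0,
    PySem.Dict.items_counter, List.map_map]
  have : ((fun vc : Int × Int => PySem.Int.floordiv vc.1 m * vc.2) ∘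
      fun k => (k, (cups.count k : Int)))
      = fun k => PySem.Int.floordiv k m * ((cups.count k : Nat) : Int) := rfl
  rw [zero_add, this, sum_count_mul (fun k => PySem.Int.floordiv k m) cups (PySem.Set.ofList cups)
    (PySem.Set.nodup_ofList cups) (fun x hx => (PySem.Set.mem_ofList cups x).mpr hx)]

-- A's loop and B's recursion follow the same trajectory
theorem searchLoop_eq_bGo (cups : List Int) (target : Int) :
    ∀ (n : Nat) (lo hi best : Int), (hi - lo + 1).toNat ≤ n →
      searchLoop cups target lo hi best = bGo (bFreq cups).items target lo hi best := by
  intro n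
  induction n with
  | zero =>
    intro lo hi best hn
    rw [searchLoop, bGo]
    have hgt : lo > hi := by omega
    simp [hgt]
  | succ n ih =>
    intro lo hi best hn
    rw [searchLoop, bGo]
    by_cases hle : lo ≤ hi
    · have hmid := PySem.Int.floordiv_two_mid_bounds hle
      have hgt : ¬ lo > hi := by omega
      simp only [dif_pos hle, dif_neg hgt]
      have henough : bEnough (bFreq cups).items target (PySem.Int.floordiv (lo + hi) 2)
          = decide ((cups.map (fun cup => PySem.Int.floordiv cup (PySem.Int.floordiv (lo + hi) 2))).sum ≥ target) := by
        simp [bEnough, bTotal_eq]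
      rw [henough]
      by_cases hc : (cups.map (fun cup => PySem.Int.floordiv cup (PySem.Int.floordiv (lo + hi) 2))).sum ≥ target
      · simp only [hc, decide_true, if_true]
        exact ih _ _ _ (by omega)
      · simp only [hc, decide_false, if_false]
        exact ih _ _ _ (by omega)
    · have hgt : lo > hi := by omega
      simp [hle, hgt]

-- ===== VERDICT (by name: the statement is the Claim_ definition above) =====
theorem search_spec : Claim_equal_search := by
  intro cups target _ _
  unfold Spec_search search search_alt
  exact searchLoop_eq_bGo cups target ((((PySem.List.max? cups id).getD 0) - 1 + 1).toNat) 1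
    ((PySem.List.max? cups id).getD 0) 0 (le_refl _)
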